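-- pv_equiv track=rewrite | github.com/minosfuture/vllm | vllm/v1/attention/backends/utils.py | _consolidate_to_ranges
-- ===== SOURCE A (Python) =====
-- def _consolidate_to_ranges(indices):
--     """
--     Convert a list of indices to consecutive ranges.
--
--     Args:
--         indices: Sorted list of indices
--
--     Returns:
--         List of (start, end) tuples representing consecutive ranges
--     """
--     if not indices:
--         return []
--
--     ranges = []
--     current_start = indices[0]
--     current_end = indices[0]
--
--     for i in range(1, len(indices)):
--         if indices[i] == current_end + 1:
--             # Consecutive index, extend current range
--             current_end = indices[i]
--         else:
--             # Gap found, close current range and start new one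
--             ranges.append((current_start, current_end + 1))
--             current_start = indices[i]
--             current_end = indices[i]
--
--     # Add the final range
--     ranges.append((current_start, current_end + 1))
--
--     return ranges
-- ===== SOURCE B (Python) =====
-- def _consolidate_to_ranges(indices):
--     """Consolidate sorted indices: find the break points between adjacent
--     elements, then zip the run starts with the run ends."""
--     if not indices:
--         return []
--     breaks = [(a, b) for a, b in zip(indices, indices[1:]) if b != a + 1]
--     starts = [indices[0]] + [b for _, b in breaks]
--     ends = [a + 1 for a, _ in breaks] + [indices[-1] + 1]
--     return list(zip(starts, ends))
-- ===== Notes on version B (the rewrite author's own statement) =====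
-- stated objective: alternative
-- what changed: Replaces A's stateful loop carrying (ranges, current_start, current_end) by computing the list of break points between adjacent elements once (zip of the list with its tail) and zipping the run starts with the run ends.
import Mathlib
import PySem

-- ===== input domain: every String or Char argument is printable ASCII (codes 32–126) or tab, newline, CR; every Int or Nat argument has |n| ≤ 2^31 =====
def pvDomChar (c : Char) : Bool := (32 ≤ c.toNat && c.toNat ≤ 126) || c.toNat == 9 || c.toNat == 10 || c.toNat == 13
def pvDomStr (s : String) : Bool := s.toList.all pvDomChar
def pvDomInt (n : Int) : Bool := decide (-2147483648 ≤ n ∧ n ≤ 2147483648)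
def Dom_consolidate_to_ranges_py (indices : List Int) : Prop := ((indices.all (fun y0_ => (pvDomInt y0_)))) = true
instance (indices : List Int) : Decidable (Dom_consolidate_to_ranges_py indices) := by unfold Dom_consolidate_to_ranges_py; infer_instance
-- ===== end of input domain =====

-- B replaces A's stateful start/end accumulator loop by computing the break
-- points between adjacent elements once and zipping run starts with run ends
-- (objective: alternative decomposition, same cost).

-- ===== PORT A =====
-- literal port of A: running (ranges, current_start, current_end) state over range(1, len)
def consolidate_to_ranges_py (indices : List Int) : List (Int × Int) :=
  if indices = [] then []
  else
    let first := PySem.List.pyGetD indices 0 0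
    let st := (PySem.List.pyRange 1 (indices.length : Int) 1).foldl
      (fun (s : List (Int × Int) × Int × Int) i =>
        let x := PySem.List.pyGetD indices i 0
        if x = s.2.2 + 1 then (s.1, s.2.1, x)
        else (s.1 ++ [(s.2.1, s.2.2 + 1)], x, x))
      ([], first, first)
    st.1 ++ [(st.2.1, st.2.2 + 1)]

-- ===== PORT B =====
-- literal port of Source B: breaks = [(a,b) in zip(indices, indices[1:]) if b != a+1];
-- zip([indices[0]] + seconds(breaks), firsts(breaks)+1 ++ [indices[-1]+1])
def consolidate_to_ranges_py_alt (indices : List Int) : List (Int × Int) :=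
  if indices = [] then []
  else
    let breaks := (indices.zip (PySem.List.slice indices (some 1) none)).filter
      (fun p => decide (p.2 ≠ p.1 + 1))
    let starts := PySem.List.pyGetD indices 0 0 :: breaks.map (·.2)
    let ends := breaks.map (fun p => p.1 + 1) ++ [PySem.List.pyGetD indices (-1) 0 + 1]
    starts.zip ends

-- ===== PRECONDITION & SPEC =====
def Spec_consolidate_to_ranges_py (indices : List Int) (out : List (Int × Int)) : Prop := out = consolidate_to_ranges_py_alt indices
instance (indices : List Int) (out : List (Int × Int)) : Decidable (Spec_consolidate_to_ranges_py indices out) := by unfold Spec_consolidate_to_ranges_py; infer_instance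

-- ===== CLAIM (what is proved, stated in full; the proofs are below) =====
def Claim_equal_consolidate_to_ranges_py : Prop := ∀ (indices : List Int), Dom_consolidate_to_ranges_py indices → Spec_consolidate_to_ranges_py indices (consolidate_to_ranges_py indices)

-- ===== LEMMAS AND PROOFS =====

-- common characterisation: runs of consecutive values, recursively
def pvGo (start prev : Int) : List Int → List (Int × Int)
  | [] => [(start, prev + 1)]
  | y :: t => if y = prev + 1 then pvGo start y t else (start, prev + 1) :: pvGo y y t

lemma pvFoldA (rest : List Int) : ∀ (acc : List (Int × Int)) (start prev : Int),
    (let st := rest.foldl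
        (fun (s : List (Int × Int) × Int × Int) x =>
          if x = s.2.2 + 1 then (s.1, s.2.1, x)
          else (s.1 ++ [(s.2.1, s.2.2 + 1)], x, x))
        (acc, start, prev)
     st.1 ++ [(st.2.1, st.2.2 + 1)]) = acc ++ pvGo start prev rest := by
  induction rest with
  | nil => intro acc start prev; simp [pvGo]
  | cons y t ih =>
    intro acc start prev
    simp only [List.foldl_cons, pvGo]
    by_cases h : y = prev + 1
    · simp only [h]
      exact ih acc start (prev + 1)
    · simp only [if_neg h]
      rw [ih (acc ++ [(start, prev + 1)]) y y]
      simp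

lemma pvZipB (rest : List Int) : ∀ (start prev : Int),
    ((start :: (((prev :: rest).zip rest).filter (fun p => decide (p.2 ≠ p.1 + 1))).map (·.2)).zip
      ((((prev :: rest).zip rest).filter (fun p => decide (p.2 ≠ p.1 + 1))).map (fun p => p.1 + 1)
        ++ [PySem.List.pyGetD (prev :: rest) (-1) 0 + 1]))
    = pvGo start prev rest := by
  induction rest with
  | nil => intro start prev; simp [pvGo, PySem.List.pyGetD, PySem.List.pyGet?, PySem.List.pyIdx?]
  | cons y t ih =>
    intro start prev
    have hlast : PySem.List.pyGetD (prev :: y :: t) (-1) 0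
        = PySem.List.pyGetD (y :: t) (-1) 0 := by
      rw [PySem.List.pyGetD_neg_one (prev :: y :: t) 0 (by simp),
          PySem.List.pyGetD_neg_one (y :: t) 0 (by simp)]
      simp
    simp only [List.zip_cons_cons, List.filter_cons, hlast, pvGo]
    by_cases h : y = prev + 1
    · simp only [h, decide_eq_true_eq]
      have : ¬ (prev + 1 ≠ prev + 1) := by simp
      simp only [if_neg this]
      exact ih start (prev + 1)
    · simp only [decide_eq_true_eq]
      rw [if_pos h, if_neg h]
      simp only [List.map_cons, List.cons_append, List.zip_cons_cons]
      rw [ih y y]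

lemma pvAltEq (x : Int) (rest : List Int) :
    consolidate_to_ranges_py_alt (x :: rest) = pvGo x x rest := by
  unfold consolidate_to_ranges_py_alt
  rw [if_neg (by simp)]
  simp only [PySem.List.slice_from_one, List.tail_cons, PySem.List.pyGetD_zero_cons]
  exact pvZipB rest x x

lemma pvAEq (x : Int) (rest : List Int) :
    consolidate_to_ranges_py (x :: rest) = pvGo x x rest := by
  unfold consolidate_to_ranges_py
  rw [if_neg (by simp)]
  simp only [PySem.List.pyGetD_zero_cons]
  have hfold := PySem.List.foldl_pyRange_pyGetD' (xs := x :: rest) (a := 1) (d := 0)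
    (f := fun (s : List (Int × Int) × Int × Int) x =>
          if x = s.2.2 + 1 then (s.1, s.2.1, x)
          else (s.1 ++ [(s.2.1, s.2.2 + 1)], x, x))
    (init := ([], x, x)) (by omega)
  rw [hfold]
  simpa using pvFoldA rest [] x x

-- ===== VERDICT (by name: the statement is the Claim_ definition above) =====
theorem consolidate_to_ranges_py_spec : Claim_equal_consolidate_to_ranges_py := by
  intro indices _
  unfold Spec_consolidate_to_ranges_py
  cases indices with
  | nil => rfl
  | cons x rest => rw [pvAEq, pvAltEq]
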